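-- pv_equiv track=rewrite | github.com/Circleprogram/PDG2Seq | pdggraph2pdgseq.py | EdgeCheck
-- ===== SOURCE A (Python) =====
-- def EdgeCheck(e, int_edges_labels, edge_mapping):
--     # 传进来的e中的边数只能是＞=1
--     if len(e) == 1:
--         if 'DDG' in int_edges_labels[edge_mapping[e[0]]][2]:  # 一条边的情况直接使用，并判断是控制依赖还是数据依赖
--             return 'd', e[0]
--         else:
--             return 'c', e[0]
--     else:
--         ddg_edges = []
--         cdg_edges = []
--         for e_item in e:
--             if 'DDG' in int_edges_labels[edge_mapping[e_item]][2]: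
--                 ddg_edges.append(e_item)
--             else:
--                 cdg_edges.append(e_item)
--         if cdg_edges:
--             cur_point = cdg_edges[0][0]
--             min_point = cdg_edges[0][1]
--             label = cdg_edges[0][2]
--             for cdg_edge in cdg_edges:
--                 if cdg_edge[1] < min_point:  # 优先选控制依赖边，且多条控制依赖边选目标节点最小的
--                     min_point = cdg_edge[1]
--                     label = cdg_edge[2]
--                 else:
--                     continue
--             return 'c', (cur_point, min_point, label)
--         else:
--             cur_point = ddg_edges[0][0]
--             min_point = ddg_edges[0][1]
--             label = ddg_edges[0][2]
--             for ddg_edge in ddg_edges: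
--                 if ddg_edge[1] < min_point:  # 后选数据依赖边，且数据依赖边优先选目标节点最小的
--                     min_point = ddg_edge[1]
--                     label = ddg_edge[2]
--                 else:
--                     continue
--             return 'd', (cur_point, min_point, label)
-- ===== SOURCE B (Python) =====
-- def EdgeCheck(e, int_edges_labels, edge_mapping):
--     if len(e) == 1:
--         if 'DDG' in int_edges_labels[edge_mapping[e[0]]][2]:
--             return 'd', e[0]
--         else:
--             return 'c', e[0]
--     # single pass: per category keep (first source, running min target, its label)
--     c_state = None
--     d_state = None
--     for src, tgt, lab in e:
--         is_d = 'DDG' in int_edges_labels[edge_mapping[(src, tgt, lab)]][2]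
--         st = d_state if is_d else c_state
--         if st is None:
--             st = (src, tgt, lab)
--         elif tgt < st[1]:
--             st = (st[0], tgt, lab)
--         if is_d:
--             d_state = st
--         else:
--             c_state = st
--     if c_state is not None:
--         return 'c', c_state
--     return 'd', d_state
-- ===== Notes on version B (the rewrite author's own statement) =====
-- stated objective: alternative
-- what changed: Replaces A's two-phase partition-into-two-lists followed by a separate minimum scan with a single pass over e that maintains, per category, only a (first source, running min target, label) triple, so no intermediate edge lists are built.
import Mathlib
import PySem

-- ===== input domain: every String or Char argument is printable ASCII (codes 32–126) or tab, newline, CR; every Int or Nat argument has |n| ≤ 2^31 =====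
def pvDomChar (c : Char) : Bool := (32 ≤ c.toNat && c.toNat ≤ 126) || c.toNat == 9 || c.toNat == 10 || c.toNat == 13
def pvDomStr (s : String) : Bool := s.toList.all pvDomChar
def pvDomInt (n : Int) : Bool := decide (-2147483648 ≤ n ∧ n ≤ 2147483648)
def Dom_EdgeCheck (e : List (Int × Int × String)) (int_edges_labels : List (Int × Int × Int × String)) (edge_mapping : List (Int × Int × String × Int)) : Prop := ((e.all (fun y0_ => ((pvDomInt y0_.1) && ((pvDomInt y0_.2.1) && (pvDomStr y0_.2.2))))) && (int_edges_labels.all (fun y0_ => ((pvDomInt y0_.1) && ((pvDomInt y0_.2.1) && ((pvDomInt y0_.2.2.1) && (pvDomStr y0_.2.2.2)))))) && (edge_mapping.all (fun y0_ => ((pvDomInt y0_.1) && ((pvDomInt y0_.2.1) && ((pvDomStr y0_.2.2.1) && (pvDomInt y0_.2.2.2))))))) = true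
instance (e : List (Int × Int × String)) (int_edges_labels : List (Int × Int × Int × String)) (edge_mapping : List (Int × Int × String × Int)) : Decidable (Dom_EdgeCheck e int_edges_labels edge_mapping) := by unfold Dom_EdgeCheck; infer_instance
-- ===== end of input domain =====

-- B replaces A's partition-into-two-lists + separate minimum scan with one pass keeping per-category
-- (first source, running min target, label) state; alternative decomposition, same asymptotic cost.


-- ===== PORT A =====
-- shared lookup primitives: edge_mapping / int_edges_labels are Python dicts (assoc lists, first match)
def emLookup : List (Int × Int × String × Int) → (Int × Int × String) → Option Int
  | [], _ => none
  | (a, b, c, v) :: t, k => if (a, b, c) = k then some v else emLookup t k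

def ielLookup : List (Int × Int × Int × String) → Int → Option (Int × Int × String)
  | [], _ => none
  | (k, x, y, s) :: t, q => if k = q then some (x, y, s) else ielLookup t q

-- label of int_edges_labels[edge_mapping[edge]][2]; none exactly where Python raises KeyError
def labelOf (int_edges_labels : List (Int × Int × Int × String)) (edge_mapping : List (Int × Int × String × Int)) (edge : Int × Int × String) : Option String :=
  (emLookup edge_mapping edge).bind (fun i => (ielLookup int_edges_labels i).map (fun v => v.2.2))

-- 'DDG' in int_edges_labels[edge_mapping[edge]][2]
def isDDG (int_edges_labels : List (Int × Int × Int × String)) (edge_mapping : List (Int × Int × String × Int)) (edge : Int × Int × String) : Bool :=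
  PySem.Str.isIn "DDG" ((labelOf int_edges_labels edge_mapping edge).getD "")

-- A's minimum scan over one category list: state = (min_point, label)
def scanMin (l : List (Int × Int × String)) (st : Int × String) : Int × String :=
  l.foldl (fun s x => if x.2.1 < s.1 then (x.2.1, x.2.2) else s) st

def EdgeCheck (e : List (Int × Int × String)) (int_edges_labels : List (Int × Int × Int × String)) (edge_mapping : List (Int × Int × String × Int)) : String × (Int × Int × String) :=
  if e.length = 1 then
    let e0 := (PySem.List.pyGet? e 0).getD (0, 0, "")
    if isDDG int_edges_labels edge_mapping e0 then ("d", e0) else ("c", e0)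
  else
    let part := e.foldl (fun (p : List (Int × Int × String) × List (Int × Int × String)) x =>
      if isDDG int_edges_labels edge_mapping x then (p.1 ++ [x], p.2) else (p.1, p.2 ++ [x])) ([], [])
    let ddg_edges := part.1
    let cdg_edges := part.2
    if cdg_edges ≠ [] then
      let h := (PySem.List.pyGet? cdg_edges 0).getD (0, 0, "")
      let r := scanMin cdg_edges (h.2.1, h.2.2)
      ("c", (h.1, r.1, r.2))
    else
      let h := (PySem.List.pyGet? ddg_edges 0).getD (0, 0, "")
      let r := scanMin ddg_edges (h.2.1, h.2.2)
      ("d", (h.1, r.1, r.2))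

-- ===== PORT B =====
-- one-pass per-category state update: None → first edge; else keep first source, take strictly smaller target
def updOpt (st : Option (Int × Int × String)) (x : Int × Int × String) : Option (Int × Int × String) :=
  match st with
  | none => some x
  | some (s, m, lab) => if x.2.1 < m then some (s, x.2.1, x.2.2) else some (s, m, lab)

def EdgeCheck_alt (e : List (Int × Int × String)) (int_edges_labels : List (Int × Int × Int × String)) (edge_mapping : List (Int × Int × String × Int)) : String × (Int × Int × String) :=
  if e.length = 1 then
    let e0 := (PySem.List.pyGet? e 0).getD (0, 0, "")
    if isDDG int_edges_labels edge_mapping e0 then ("d", e0) else ("c", e0)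
  else
    let st := e.foldl (fun (p : Option (Int × Int × String) × Option (Int × Int × String)) x =>
      if isDDG int_edges_labels edge_mapping x then (p.1, updOpt p.2 x) else (updOpt p.1 x, p.2)) (none, none)
    match st.1 with
    | some c => ("c", c)
    | none => ("d", st.2.getD (0, 0, ""))

-- ===== PRECONDITION & SPEC =====
-- Pre_ excludes exactly the inputs where Python A raises: e = [] (IndexError on ddg_edges[0]) and
-- edges missing from edge_mapping / indices missing from int_edges_labels (KeyError); the Nodup
-- conjuncts only rule out duplicate-key association lists, which cannot arise from a Python dict.
def Pre_EdgeCheck (e : List (Int × Int × String)) (int_edges_labels : List (Int × Int × Int × String)) (edge_mapping : List (Int × Int × String × Int)) : Prop :=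
  e ≠ [] ∧
  (edge_mapping.map (fun q => (q.1, q.2.1, q.2.2.1))).Nodup ∧
  (int_edges_labels.map (fun r => r.1)).Nodup ∧
  ∀ x ∈ e, ∃ q ∈ edge_mapping, (q.1, q.2.1, q.2.2.1) = x ∧ ∃ r ∈ int_edges_labels, r.1 = q.2.2.2
instance (e : List (Int × Int × String)) (int_edges_labels : List (Int × Int × Int × String)) (edge_mapping : List (Int × Int × String × Int)) : Decidable (Pre_EdgeCheck e int_edges_labels edge_mapping) := by unfold Pre_EdgeCheck; infer_instance

def pvWitness_EdgeCheck : (List (Int × Int × String)) × (List (Int × Int × Int × String)) × (List (Int × Int × String × Int)) :=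
  ([(1, 2, "a"), (3, 4, "b")], [(0, 1, 2, "DDG: x"), (1, 3, 4, "CDG")], [(1, 2, "a", 0), (3, 4, "b", 1)])

def Spec_EdgeCheck (e : List (Int × Int × String)) (int_edges_labels : List (Int × Int × Int × String)) (edge_mapping : List (Int × Int × String × Int)) (out : String × (Int × Int × String)) : Prop := out = EdgeCheck_alt e int_edges_labels edge_mapping
instance (e : List (Int × Int × String)) (int_edges_labels : List (Int × Int × Int × String)) (edge_mapping : List (Int × Int × String × Int)) (out : String × (Int × Int × String)) : Decidable (Spec_EdgeCheck e int_edges_labels edge_mapping out) := by unfold Spec_EdgeCheck; infer_instance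

-- ===== CLAIM (what is proved, stated in full; the proofs are below) =====
def Claim_equal_EdgeCheck : Prop := ∀ (e : List (Int × Int × String)) (int_edges_labels : List (Int × Int × Int × String)) (edge_mapping : List (Int × Int × String × Int)), Dom_EdgeCheck e int_edges_labels edge_mapping → Pre_EdgeCheck e int_edges_labels edge_mapping → Spec_EdgeCheck e int_edges_labels edge_mapping (EdgeCheck e int_edges_labels edge_mapping)

-- ===== LEMMAS AND PROOFS =====

-- B's fused loop = the per-category folds over the two filtered sublists
theorem foldB_split (p : (Int × Int × String) → Bool) (e : List (Int × Int × String)) :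
    ∀ (c d : Option (Int × Int × String)),
    e.foldl (fun q x => if p x then (q.1, updOpt q.2 x) else (updOpt q.1 x, q.2)) (c, d)
      = ((e.filter (fun x => !p x)).foldl updOpt c, (e.filter p).foldl updOpt d) := by
  induction e with
  | nil => intro c d; rfl
  | cons h t ih =>
    intro c d
    by_cases hp : p h = true <;> simp [List.foldl_cons, hp, ih]

-- A's partition loop = the two filters
theorem foldA_part (p : (Int × Int × String) → Bool) (e : List (Int × Int × String)) :
    ∀ (a b : List (Int × Int × String)),
    e.foldl (fun q x => if p x then (q.1 ++ [x], q.2) else (q.1, q.2 ++ [x])) (a, b)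
      = (a ++ e.filter p, b ++ e.filter (fun x => !p x)) := by
  induction e with
  | nil => intro a b; simp
  | cons h t ih =>
    intro a b
    by_cases hp : p h = true <;> simp [List.foldl_cons, hp, ih]

-- folding updOpt from a some-state keeps the source and runs A's min scan
theorem foldOpt_some (l : List (Int × Int × String)) :
    ∀ (s : Int) (m : Int) (lab : String),
    l.foldl updOpt (some (s, m, lab)) = some (s, (scanMin l (m, lab)).1, (scanMin l (m, lab)).2) := by
  induction l with
  | nil => intro s m lab; rfl
  | cons h t ih =>
    intro s m lab
    by_cases hlt : h.2.1 < m <;> simp [List.foldl_cons, updOpt, scanMin, hlt, ih]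

-- the first step of A's scan over the list headed by its own seed is a no-op
theorem scanMin_cons_self (h : Int × Int × String) (t : List (Int × Int × String)) :
    scanMin (h :: t) h.2 = scanMin t h.2 := by
  simp [scanMin, List.foldl_cons]

theorem foldOpt_none_cons (h : Int × Int × String) (t : List (Int × Int × String)) :
    (h :: t).foldl updOpt none = some (h.1, (scanMin t (h.2.1, h.2.2)).1, (scanMin t (h.2.1, h.2.2)).2) := by
  have : (h :: t).foldl updOpt none = t.foldl updOpt (some (h.1, h.2.1, h.2.2)) := rfl
  rw [this, foldOpt_some]

theorem filter_all_true {α : Type} (p : α → Bool) (l : List α)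
    (hnone : l.filter (fun x => !p x) = []) : l.filter p = l := by
  have h : ∀ x ∈ l, p x = true := by
    intro x hx
    by_contra hpx
    have : x ∈ l.filter (fun x => !p x) := List.mem_filter.mpr ⟨hx, by simp [hpx]⟩
    simp [hnone] at this
  exact List.filter_eq_self.mpr h

-- ===== VERDICT (by name: the statement is the Claim_ definition above) =====
theorem EdgeCheck_spec : Claim_equal_EdgeCheck := by
  intro e iel em _ hpre
  obtain ⟨hne, -⟩ := hpre
  unfold Spec_EdgeCheck EdgeCheck EdgeCheck_alt
  by_cases hlen : e.length = 1
  · simp [hlen]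
  · simp only [hlen, if_false]
    rw [foldA_part, foldB_split]
    simp only [List.nil_append]
    set p := isDDG iel em with hp
    cases hcdg : e.filter (fun x => !p x) with
    | cons ch ct =>
      have hcne : (ch :: ct) ≠ ([] : List (Int × Int × String)) := by simp
      rw [if_pos hcne, foldOpt_none_cons]
      simp [PySem.List.pyGet?, PySem.List.pyIdx?]
      exact scanMin_cons_self ch ct
    | nil =>
      have hddg : e.filter p = e := filter_all_true p e hcdg
      rw [hddg]
      cases e with
      | nil => exact absurd rfl hne
      | cons h t =>
        rw [if_neg (by simp : ¬ (([] : List (Int × Int × String)) ≠ []))]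
        rw [foldOpt_none_cons]
        simp [PySem.List.pyGet?, PySem.List.pyIdx?, scanMin_cons_self]
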